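-- pv_equiv track=rewrite | github.com/seshamaven/ATS_AI | location_identifier.py | _clean_city_name
-- ===== SOURCE A (Python) =====
-- def _clean_city_name(city: str) -> str:
--     """
--     Clean city name by removing common prefixes like 'Phone', 'Email', etc.
--
--     Example:
--         "Csm Phone Hyderabad" → "Hyderabad"
--         "Email Address Portland" → "Portland"
--         "Contact Number Mumbai" → "Mumbai"
--     """
--     if not city:
--         return city
--
--     # Invalid prefixes that should be removed
--     invalid_prefixes = [
--         'email address', 'phone number', 'mobile number', 'contact number',
--         'email', 'phone', 'contact', 'address', 'mobile', 'cell',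
--         'tel', 'telephone', 'fax', 'csm', 'customer', 'number',
--         'name', 'title', 'position', 'role', 'department'
--     ]
--
--     # Try to remove prefixes (longest first)
--     words = city.split()
--     cleaned_words = []
--     skip_next = False
--
--     for i, word in enumerate(words):
--         if skip_next:
--             skip_next = False
--             continue
--
--         word_lower = word.lower()
--
--         # Check if this word is an invalid prefix
--         is_prefix = word_lower in invalid_prefixes
--
--         # Check if this word + next word form an invalid prefix
--         if i < len(words) - 1:
--             two_words = f"{word_lower} {words[i+1].lower()}"
--             if two_words in invalid_prefixes:
--                 skip_next = True
--                 continue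
--
--         # If not a prefix, keep it
--         if not is_prefix:
--             cleaned_words.append(word)
--
--     return ' '.join(cleaned_words) if cleaned_words else city
-- ===== SOURCE B (Python) =====
-- def _clean_city_name(city: str) -> str:
--     """Single-pass stateless filter: drop any word whose lowercase form is a
--     contact-info prefix word; the two-word phrases of the original are covered
--     because each of their words is itself a prefix word."""
--     if not city:
--         return city
--
--     prefix_words = {
--         'email', 'phone', 'contact', 'address', 'mobile', 'cell',
--         'tel', 'telephone', 'fax', 'csm', 'customer', 'number',
--         'name', 'title', 'position', 'role', 'department'
--     }
--
--     cleaned = [w for w in city.split() if w.lower() not in prefix_words]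
--     return ' '.join(cleaned) if cleaned else city
-- ===== Notes on version B (the rewrite author's own statement) =====
-- stated objective: simpler
-- what changed: Replaced the stateful skip_next loop with its bigram lookahead by a single stateless filter over the words, since each word of every two-word prefix phrase is itself a single-word prefix.
import Mathlib
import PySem

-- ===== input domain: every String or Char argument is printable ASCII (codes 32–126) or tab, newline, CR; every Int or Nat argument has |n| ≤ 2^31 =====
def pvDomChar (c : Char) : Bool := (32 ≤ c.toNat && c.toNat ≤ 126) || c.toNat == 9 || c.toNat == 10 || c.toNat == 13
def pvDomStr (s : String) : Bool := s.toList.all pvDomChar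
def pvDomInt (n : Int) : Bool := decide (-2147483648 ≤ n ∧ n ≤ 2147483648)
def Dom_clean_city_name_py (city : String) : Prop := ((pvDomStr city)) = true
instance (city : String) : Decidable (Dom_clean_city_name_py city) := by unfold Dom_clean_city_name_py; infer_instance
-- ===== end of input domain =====

-- B replaces A's skip_next/bigram loop with a single stateless word filter (objective: simpler);
-- the two-word phrases are covered because each of their words is itself a prefix word.

-- ===== PORT A =====
def pvInvalidPrefixes : List String :=
  ["email address", "phone number", "mobile number", "contact number",
   "email", "phone", "contact", "address", "mobile", "cell",
   "tel", "telephone", "fax", "csm", "customer", "number",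
   "name", "title", "position", "role", "department"]

-- the for-loop over enumerate(words) with the skip_next flag, looking at words[i+1] as the head of the tail
def pvCleanLoop : List String → Bool → List String
  | [], _ => []
  | word :: rest, skipNext =>
    if skipNext then pvCleanLoop rest false
    else
      let wordLower := PySem.Str.lower word
      let isPrefix := pvInvalidPrefixes.contains wordLower
      match rest with
      | next :: _ =>
        if pvInvalidPrefixes.contains (wordLower ++ " " ++ PySem.Str.lower next) then
          pvCleanLoop rest true
        else if !isPrefix then word :: pvCleanLoop rest false
        else pvCleanLoop rest false
      | [] => if !isPrefix then [word] else []

def clean_city_name_py (city : String) : String :=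
  if city = "" then city
  else
    let words := PySem.Str.split₀ city
    let cleanedWords := pvCleanLoop words false
    if cleanedWords ≠ [] then PySem.Str.join " " cleanedWords else city

-- ===== PORT B =====
def pvPrefixWordList : List String :=
  ["email", "phone", "contact", "address", "mobile", "cell",
   "tel", "telephone", "fax", "csm", "customer", "number",
   "name", "title", "position", "role", "department"]

def pvPrefixWords : PySem.Set String := PySem.Set.ofList pvPrefixWordList

def clean_city_name_py_alt (city : String) : String :=
  if city = "" then city
  else
    let cleaned := (PySem.Str.split₀ city).filter
      (fun w => !(pvPrefixWords.contains (PySem.Str.lower w)))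
    if cleaned ≠ [] then PySem.Str.join " " cleaned else city

-- ===== PRECONDITION & SPEC =====
def Spec_clean_city_name_py (city : String) (out : String) : Prop := out = clean_city_name_py_alt city
instance (city : String) (out : String) : Decidable (Spec_clean_city_name_py city out) := by unfold Spec_clean_city_name_py; infer_instance

-- ===== CLAIM (what is proved, stated in full; the proofs are below) =====
def Claim_equal_clean_city_name_py : Prop := ∀ (city : String), Dom_clean_city_name_py city → Spec_clean_city_name_py city (clean_city_name_py city)

-- ===== LEMMAS AND PROOFS =====

-- split() produces whitespace-free tokens: the invariant of Chars.split₀.go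
lemma pv_split_go_sf (s : List Char) : ∀ (cur : List Char) (acc : List (List Char)),
    (∀ c ∈ cur, PySem.Chars.isspace c = false) →
    (∀ t ∈ acc, ∀ c ∈ t, PySem.Chars.isspace c = false) →
    ∀ t ∈ PySem.Chars.split₀.go s cur acc, ∀ c ∈ t, PySem.Chars.isspace c = false := by
  induction s with
  | nil =>
    intro cur acc hc ha t ht
    simp only [PySem.Chars.split₀.go] at ht
    split at ht
    · simp only [List.mem_reverse] at ht
      exact ha t ht
    · simp only [List.mem_reverse, List.mem_cons] at ht
      rcases ht with h | h
      · subst h; intro c hc'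
        exact hc c (List.mem_reverse.mp hc')
      · exact ha t h
  | cons x s ih =>
    intro cur acc hc ha t ht
    simp only [PySem.Chars.split₀.go] at ht
    split at ht
    · next hx =>
      split at ht
      · exact ih [] acc (by simp) ha t ht
      · refine ih [] (cur.reverse :: acc) (by simp) ?_ t ht
        intro u hu
        rcases List.mem_cons.mp hu with h | h
        · subst h; intro c hc'
          exact hc c (List.mem_reverse.mp hc')
        · exact ha u h
    · next hx =>
      refine ih (x :: cur) acc ?_ ha t ht
      intro c hc'
      rcases List.mem_cons.mp hc' with h | h
      · subst h; exact Bool.eq_false_iff.mpr hx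
      · exact hc c h

lemma pv_split_space_free (s : String) : ∀ w ∈ PySem.Str.split₀ s, ' ' ∉ w.toList := by
  intro w hw hmem
  have hts : w.toList ∈ PySem.Chars.split₀ s.toList := by
    simp only [PySem.Str.split₀, List.mem_map] at hw
    obtain ⟨t, ht, rfl⟩ := hw
    simpa [String.toList_ofList] using ht
  have := pv_split_go_sf s.toList [] [] (by simp) (by simp) w.toList hts ' ' hmem
  simp [PySem.Chars.isspace] at this

lemma pv_lowerChar_space (c : Char) (h : PySem.Chars.lowerChar c = ' ') : c = ' ' := by
  unfold PySem.Chars.lowerChar at h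
  split at h
  · next hu =>
    exfalso
    simp only [PySem.Chars.isupper, Bool.and_eq_true, decide_eq_true_eq, Char.le_def] at hu
    have hlo : 65 ≤ c.toNat := by
      have := hu.1; rw [UInt32.le_iff_toNat_le] at this; exact this
    have hhi : c.toNat ≤ 90 := by
      have := hu.2; rw [UInt32.le_iff_toNat_le] at this; exact this
    have hval : (c.toNat + 32).isValidChar := Or.inl (by omega)
    have hv : (Char.ofNat (c.toNat + 32)).toNat = c.toNat + 32 := by
      rw [Char.toNat_ofNat, if_pos hval]
    rw [h] at hv
    have h32 : (' ').toNat = 32 := by decide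
    omega
  · exact h

lemma pv_lower_space_free (w : String) (h : ' ' ∉ w.toList) : ' ' ∉ (PySem.Str.lower w).toList := by
  intro hmem
  simp only [PySem.Str.lower, String.toList_ofList, PySem.Chars.lower, List.mem_map] at hmem
  obtain ⟨c, hc, hlc⟩ := hmem
  exact h (pv_lowerChar_space c hlc ▸ hc)

-- on a space-free string the full prefix list and B's single-word set agree
lemma pv_contains_eq (s : String) (h : ' ' ∉ s.toList) :
    pvInvalidPrefixes.contains s = pvPrefixWords.contains s := by
  have hiff : s ∈ pvInvalidPrefixes ↔ s ∈ pvPrefixWordList := by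
    constructor
    · intro hm
      simp only [pvInvalidPrefixes, List.mem_cons, List.not_mem_nil, or_false] at hm
      rcases hm with rfl | rfl | rfl | rfl | hm
      · exact absurd (by decide : ' ' ∈ ("email address").toList) h
      · exact absurd (by decide : ' ' ∈ ("phone number").toList) h
      · exact absurd (by decide : ' ' ∈ ("mobile number").toList) h
      · exact absurd (by decide : ' ' ∈ ("contact number").toList) h
      · simp only [pvPrefixWordList, List.mem_cons, List.not_mem_nil, or_false]
        tauto
    · intro hm
      simp only [pvPrefixWordList, List.mem_cons, List.not_mem_nil, or_false] at hm
      simp only [pvInvalidPrefixes, List.mem_cons, List.not_mem_nil, or_false]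
      tauto
  by_cases hm : s ∈ pvPrefixWordList
  · rw [List.contains_iff_mem.mpr (hiff.mpr hm)]
    exact (PySem.Set.contains_iff _ _ |>.mpr ((PySem.Set.mem_ofList _ _).mpr hm)).symm
  · have h1 : pvInvalidPrefixes.contains s = false := by
      rw [Bool.eq_false_iff]; intro hc
      exact hm (hiff.mp (List.contains_iff_mem.mp hc))
    have h2 : pvPrefixWords.contains s = false := by
      rw [Bool.eq_false_iff]; intro hc
      exact hm ((PySem.Set.mem_ofList _ _).mp ((PySem.Set.contains_iff _ _).mp hc))
    rw [h1, h2]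

-- a space-free/space/space-free concatenation splits uniquely
lemma pv_split_space_unique (a b t : List Char) (ha : ' ' ∉ a) (h : a ++ ' ' :: b = t) :
    a = t.takeWhile (· != ' ') ∧ b = (t.dropWhile (· != ' ')).tail := by
  subst h
  have hall : ∀ c ∈ a, (c != ' ') = true := by
    intro c hc
    simp only [bne_iff_ne, ne_eq]
    intro h'; exact ha (h' ▸ hc)
  have htw : a.takeWhile (· != ' ') = a := List.takeWhile_eq_self_iff.mpr hall
  constructor
  · rw [List.takeWhile_append, htw]
    simp
  · rw [List.dropWhile_append]
    have : a.dropWhile (· != ' ') = [] := by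
      rw [List.dropWhile_eq_nil_iff]
      exact hall
    simp [this, List.dropWhile]

-- the bigram branch fires only when both words are single-word prefixes
lemma pv_bigram_decomp (wl nl : String) (hw : ' ' ∉ wl.toList) (hn : ' ' ∉ nl.toList)
    (h : pvInvalidPrefixes.contains (wl ++ " " ++ nl) = true) :
    wl ∈ pvPrefixWordList ∧ nl ∈ pvPrefixWordList := by
  have hm := List.contains_iff_mem.mp h
  have htl : (wl ++ " " ++ nl).toList = wl.toList ++ ' ' :: nl.toList := by
    simp [String.toList_append]
  simp only [pvInvalidPrefixes, List.mem_cons, List.not_mem_nil, or_false] at hm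
  have hsp : ' ' ∈ (wl ++ " " ++ nl).toList := by rw [htl]; simp
  have decomp : ∀ (target : String), (wl ++ " " ++ nl) = target →
      wl.toList = target.toList.takeWhile (· != ' ') ∧
      nl.toList = (target.toList.dropWhile (· != ' ')).tail := by
    intro target he
    have : wl.toList ++ ' ' :: nl.toList = target.toList := by rw [← htl, he]
    exact pv_split_space_unique _ _ _ hw this
  rcases hm with he | he | he | he | he | he | he | he | he | he | he | he | he | he | he | he | he | he | he | he | he
  · obtain ⟨h1, h2⟩ := decomp _ he
    have e1 : wl = "email" := String.toList_inj.mp (by rw [h1]; decide)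
    have e2 : nl = "address" := String.toList_inj.mp (by rw [h2]; decide)
    subst e1; subst e2; decide
  · obtain ⟨h1, h2⟩ := decomp _ he
    have e1 : wl = "phone" := String.toList_inj.mp (by rw [h1]; decide)
    have e2 : nl = "number" := String.toList_inj.mp (by rw [h2]; decide)
    subst e1; subst e2; decide
  · obtain ⟨h1, h2⟩ := decomp _ he
    have e1 : wl = "mobile" := String.toList_inj.mp (by rw [h1]; decide)
    have e2 : nl = "number" := String.toList_inj.mp (by rw [h2]; decide)
    subst e1; subst e2; decide
  · obtain ⟨h1, h2⟩ := decomp _ he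
    have e1 : wl = "contact" := String.toList_inj.mp (by rw [h1]; decide)
    have e2 : nl = "number" := String.toList_inj.mp (by rw [h2]; decide)
    subst e1; subst e2; decide
  all_goals
    exfalso
    rw [he] at hsp
    revert hsp; decide

lemma pvCleanLoop_skip (w : String) (rest : List String) :
    pvCleanLoop (w :: rest) true = pvCleanLoop rest false := by
  simp [pvCleanLoop]

lemma pvCleanLoop_single (w : String) :
    pvCleanLoop [w] false =
      if !(pvInvalidPrefixes.contains (PySem.Str.lower w)) then [w] else [] := by
  simp [pvCleanLoop]

lemma pvCleanLoop_cons_cons (w next : String) (rest : List String) :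
    pvCleanLoop (w :: next :: rest) false =
      if pvInvalidPrefixes.contains (PySem.Str.lower w ++ " " ++ PySem.Str.lower next) then
        pvCleanLoop (next :: rest) true
      else if !(pvInvalidPrefixes.contains (PySem.Str.lower w)) then
        w :: pvCleanLoop (next :: rest) false
      else pvCleanLoop (next :: rest) false := by
  simp [pvCleanLoop]

-- the skip_next loop equals B's stateless filter on whitespace-free tokens
lemma pv_loop_eq_filter : ∀ (n : ℕ) (ws : List String), ws.length ≤ n →
    (∀ w ∈ ws, ' ' ∉ w.toList) →
    pvCleanLoop ws false =
      ws.filter (fun w => !(pvPrefixWords.contains (PySem.Str.lower w))) := by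
  intro n
  induction n with
  | zero =>
    intro ws hlen _
    rw [List.length_eq_zero_iff.mp (Nat.le_zero.mp hlen)]
    rfl
  | succ n ih =>
    intro ws hlen hsf
    match ws with
    | [] => rfl
    | [w] =>
      have hsp := pv_lower_space_free w (hsf w (by simp))
      rw [pvCleanLoop_single, pv_contains_eq _ hsp, List.filter]
      cases h : pvPrefixWords.contains (PySem.Str.lower w) <;> simp_all
    | w :: next :: rest =>
      have hwsp := pv_lower_space_free w (hsf w (by simp))
      have hnsp := pv_lower_space_free next (hsf next (by simp))
      rw [pvCleanLoop_cons_cons]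
      by_cases hbg : pvInvalidPrefixes.contains
          (PySem.Str.lower w ++ " " ++ PySem.Str.lower next) = true
      · rw [if_pos hbg]
        obtain ⟨h1, h2⟩ := pv_bigram_decomp _ _ hwsp hnsp hbg
        have c1 : pvPrefixWords.contains (PySem.Str.lower w) = true :=
          (PySem.Set.contains_iff _ _).mpr ((PySem.Set.mem_ofList _ _).mpr h1)
        have c2 : pvPrefixWords.contains (PySem.Str.lower next) = true :=
          (PySem.Set.contains_iff _ _).mpr ((PySem.Set.mem_ofList _ _).mpr h2)
        have hrest : pvCleanLoop rest false =
            rest.filter (fun w => !(pvPrefixWords.contains (PySem.Str.lower w))) := by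
          refine ih rest ?_ ?_
          · simp only [List.length_cons] at hlen; omega
          · intro u hu; exact hsf u (by simp [hu])
        rw [pvCleanLoop_skip, hrest, List.filter, List.filter, c1, c2]
        simp
      · rw [if_neg hbg]
        have htail : pvCleanLoop (next :: rest) false =
            (next :: rest).filter (fun w => !(pvPrefixWords.contains (PySem.Str.lower w))) := by
          refine ih (next :: rest) ?_ ?_
          · simp only [List.length_cons] at hlen ⊢; omega
          · intro u hu; exact hsf u (by simp [List.mem_cons] at hu ⊢; tauto)
        rw [List.filter, ← pv_contains_eq _ hwsp]
        cases h : pvInvalidPrefixes.contains (PySem.Str.lower w) <;> simp_all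

-- ===== VERDICT (by name: the statement is the Claim_ definition above) =====
theorem clean_city_name_py_spec : Claim_equal_clean_city_name_py := by
  intro city _
  unfold Spec_clean_city_name_py clean_city_name_py clean_city_name_py_alt
  by_cases hc : city = ""
  · simp [hc]
  · simp only [if_neg hc]
    rw [pv_loop_eq_filter (PySem.Str.split₀ city).length _ le_rfl (pv_split_space_free city)]
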